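-- pv_equiv track=rewrite | github.com/Jupiter-J/Python-Algorithm | 프로그래머스/기초/숨어있는_숫자의_덧셈.py | solution
-- ===== SOURCE A (Python) =====
-- def solution(my_string):
--     answer = 0
--     for x in my_string:
--         if x.isalpha():
--             my_string = my_string.replace(x,' ')
--     for i in my_string.split():
--         answer+=int(i)
--     return answer
-- ===== SOURCE B (Python) =====
-- def solution(my_string):
--     # One linear pass: accumulate each maximal digit run as a number, add it when the run ends.
--     answer = 0
--     cur = 0
--     for ch in my_string:
--         if ch.isdigit():
--             cur = cur * 10 + (ord(ch) - 48)
--         else: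
--             answer += cur
--             cur = 0
--     return answer + cur
-- ===== Notes on version B (the rewrite author's own statement) =====
-- stated objective: faster
-- what changed: A repeatedly calls str.replace inside a loop over the whole string and then re-scans it with split/int; B is a single left-to-right pass that accumulates each maximal digit run arithmetically.
-- outside the precondition, e.g. on solution('-5'): A returns -5, B returns 5; on solution('1_2'): A returns 12, B returns 3; on solution('a.b'): A raises ValueError, B returns 0
import Mathlib
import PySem

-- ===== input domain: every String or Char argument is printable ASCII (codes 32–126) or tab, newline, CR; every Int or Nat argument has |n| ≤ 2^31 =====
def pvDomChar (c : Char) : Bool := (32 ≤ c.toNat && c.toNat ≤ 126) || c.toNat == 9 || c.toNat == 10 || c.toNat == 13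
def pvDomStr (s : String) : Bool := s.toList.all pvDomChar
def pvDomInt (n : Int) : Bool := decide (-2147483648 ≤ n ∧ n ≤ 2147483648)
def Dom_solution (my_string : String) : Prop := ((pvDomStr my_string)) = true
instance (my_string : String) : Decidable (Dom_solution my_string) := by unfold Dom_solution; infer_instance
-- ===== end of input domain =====

-- B replaces A's repeated str.replace passes plus the split/int re-scan by one single
-- left-to-right pass that accumulates each maximal digit run arithmetically (objective: faster).

-- ===== PORT A =====
-- A-side helper: Python's int(s) on a list of chars. This is a byte-for-byte replica of
-- PySem.Int.ofChars? (whitespace, optional sign, digits, single '_' between digits; none =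
-- ValueError) — kernel-identical to the prelude's definition; it is re-stated here only because
-- the prelude hides its digit loop behind a private helper that proofs cannot reference.
def pvGo : List Char → Bool → Nat → Option Nat
  | [], afterDigit, acc => if afterDigit = true then some acc else none
  | c :: rest, afterDigit, acc =>
    if c.isDigit = true then pvGo rest true (acc * 10 + (c.toNat - '0'.toNat))
    else
      if c = '_' ∧ afterDigit = true then
        match rest with
        | d :: _ => if d.isDigit = true then pvGo rest false acc else none
        | [] => none
      else none

def pvDigitsVal? : List Char → Option Nat
  | [] => none
  | cs => pvGo cs false 0

def pvIntOfChars? (s : List Char) : Option Int :=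
  have cs := (List.dropWhile PySem.Int.isIntSpace (List.dropWhile PySem.Int.isIntSpace s).reverse).reverse
  match cs with
  | '-' :: ds => Option.map (fun n => -n) (do let a ← pvDigitsVal? ds; pure (a : Int))
  | '+' :: ds => Option.map (fun n => n) (do let a ← pvDigitsVal? ds; pure ((a : Nat) : Int))
  | ds => Option.map (fun n => n) (do let a ← pvDigitsVal? ds; pure ((a : Nat) : Int))

def solution (my_string : String) : Int :=
  let s := my_string.toList
  let s2 := s.foldl (fun cur x => if PySem.Chars.isalpha x then PySem.Chars.replace cur [x] [' '] else cur) s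
  -- int(i): pvIntOfChars? is none exactly where Python raises ValueError; under Pre_solution it never is
  (PySem.Chars.split₀ s2).foldl (fun answer i => answer + (pvIntOfChars? i).getD 0) 0

-- ===== PORT B =====
def solution_alt (my_string : String) : Int :=
  let p := my_string.toList.foldl
    (fun (st : Int × Int) ch =>
      if PySem.Chars.isdigit ch then (st.1, st.2 * 10 + ((ch.toNat : Int) - 48))
      else (st.1 + st.2, 0)) (0, 0)
  p.1 + p.2

-- ===== PRECONDITION & SPEC =====
-- Pre_ restricts to the problem's natural domain (letters, digits, whitespace): outside it A either
-- raises ValueError (stray punctuation makes int() fail) or applies int()'s sign/underscore parsing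
-- rules ('-5', '1_2'), which B's digit-run reading does not reproduce.
def Pre_solution (my_string : String) : Prop :=
  (my_string.toList.all
    (fun c => PySem.Chars.isalpha c || PySem.Chars.isdigit c || PySem.Chars.isspace c)) = true
instance (my_string : String) : Decidable (Pre_solution my_string) := by unfold Pre_solution; infer_instance

def pvWitness_solution : String := "aab12cd5 7x"

def Spec_solution (my_string : String) (out : Int) : Prop := out = solution_alt my_string
instance (my_string : String) (out : Int) : Decidable (Spec_solution my_string out) := by unfold Spec_solution; infer_instance

-- ===== CLAIM (what is proved, stated in full; the proofs are below) =====
def Claim_equal_solution : Prop := ∀ (my_string : String), Dom_solution my_string → Pre_solution my_string → Spec_solution my_string (solution my_string)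

-- ===== LEMMAS AND PROOFS =====

-- B's loop body / run value / parsed-token value
def bstep (st : Int × Int) (ch : Char) : Int × Int :=
  if PySem.Chars.isdigit ch then (st.1, st.2 * 10 + ((ch.toNat : Int) - 48))
  else (st.1 + st.2, 0)

def vInt (ds : List Char) : Int := ds.foldl (fun a c => a * 10 + ((c.toNat : Int) - 48)) 0

def parseD (t : List Char) : Int := (pvIntOfChars? t).getD 0

-- character-class facts
theorem digit_bounds (c : Char) (h : PySem.Chars.isdigit c = true) : 48 ≤ c.toNat ∧ c.toNat ≤ 57 := by
  simp only [PySem.Chars.isdigit, Bool.and_eq_true, decide_eq_true_eq, Char.le_def,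
    UInt32.le_iff_toNat_le] at h
  have e0 : ('0'.val).toNat = 48 := rfl
  have e9 : ('9'.val).toNat = 57 := rfl
  have hcn : c.toNat = c.val.toNat := rfl
  omega

theorem alpha_bounds (c : Char) (h : PySem.Chars.isalpha c = true) :
    (65 ≤ c.toNat ∧ c.toNat ≤ 90) ∨ (97 ≤ c.toNat ∧ c.toNat ≤ 122) := by
  simp only [PySem.Chars.isalpha, PySem.Chars.isupper, PySem.Chars.islower, Bool.or_eq_true,
    Bool.and_eq_true, decide_eq_true_eq, Char.le_def, UInt32.le_iff_toNat_le] at h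
  have eA : ('A'.val).toNat = 65 := rfl
  have eZ : ('Z'.val).toNat = 90 := rfl
  have ea : ('a'.val).toNat = 97 := rfl
  have ez : ('z'.val).toNat = 122 := rfl
  have hcn : c.toNat = c.val.toNat := rfl
  omega

theorem digit_isDigit (c : Char) (h : PySem.Chars.isdigit c = true) : c.isDigit = true := by
  have hb := digit_bounds c h
  simp only [Char.isDigit, ge_iff_le, Bool.and_eq_true, decide_eq_true_eq,
    UInt32.le_iff_toNat_le]
  have e0 : ('0'.val).toNat = 48 := rfl
  have e9 : ('9'.val).toNat = 57 := rfl
  have hcn : c.toNat = c.val.toNat := rfl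
  omega

theorem digit_not_space (c : Char) (h : PySem.Chars.isdigit c = true) :
    PySem.Chars.isspace c = false := by
  have hb := digit_bounds c h
  cases hs : PySem.Chars.isspace c with
  | false => rfl
  | true =>
    exfalso
    simp only [PySem.Chars.isspace, Bool.or_eq_true, Bool.and_eq_true, decide_eq_true_eq] at hs
    omega

theorem alpha_not_digit (c : Char) (h : PySem.Chars.isalpha c = true) :
    PySem.Chars.isdigit c = false := by
  have ha := alpha_bounds c h
  cases hd : PySem.Chars.isdigit c with
  | false => rfl
  | true => exact absurd (digit_bounds c hd) (by omega)

theorem digit_not_intspace (c : Char) (h : PySem.Chars.isdigit c = true) :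
    PySem.Int.isIntSpace c = false := by
  have hb := digit_bounds c h
  cases hi : PySem.Int.isIntSpace c with
  | false => rfl
  | true =>
    exfalso
    simp only [PySem.Int.isIntSpace, Bool.or_eq_true, decide_eq_true_eq] at hi
    rcases hi with ((((rfl | rfl) | rfl) | rfl) | rfl) | rfl <;> exact absurd hb (by decide)

-- replace with a single-character pattern is a map
theorem replace_go_single (x : Char) :
    ∀ (l : List Char) (fuel : Nat) (acc : List Char), l.length ≤ fuel →
      PySem.Chars.replace.go [x] [' '] fuel l acc
        = acc.reverse ++ l.map (fun c => if c = x then ' ' else c) := by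
  intro l
  induction l with
  | nil =>
    intro fuel acc h
    cases fuel with
    | zero => simp [PySem.Chars.replace.go]
    | succ n => simp [PySem.Chars.replace.go]
  | cons c t ih =>
    intro fuel acc h
    cases fuel with
    | zero => simp at h
    | succ n =>
      have hlen : t.length ≤ n := by simp at h; omega
      by_cases hxc : x = c
      · subst hxc
        have hp : ([x].isPrefixOf (x :: t)) = true := by simp [List.isPrefixOf]
        simp only [PySem.Chars.replace.go, hp, if_true]
        have hdrop : List.drop [x].length (x :: t) = t := rfl
        have hrev : ([' '].reverse : List Char) ++ acc = ' ' :: acc := rfl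
        rw [hdrop, hrev, ih n (' ' :: acc) hlen]
        simp
      · have hp : ([x].isPrefixOf (c :: t)) = false := by
          simp [List.isPrefixOf]
          exact fun hh => absurd hh hxc
        have hcx : ¬ (c = x) := fun hh => hxc hh.symm
        simp only [PySem.Chars.replace.go, hp, Bool.false_eq_true, if_false]
        rw [ih n (c :: acc) hlen]
        simp [hcx]

theorem replace_single (l : List Char) (x : Char) :
    PySem.Chars.replace l [x] [' '] = l.map (fun c => if c = x then ' ' else c) := by
  simp only [PySem.Chars.replace, List.isEmpty_cons, Bool.false_eq_true, if_false]
  rw [replace_go_single x l l.length [] le_rfl]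
  simp

-- A's replace loop turns every alpha char occurring in cs into a space
theorem fold_replace (cs : List Char) :
    ∀ l : List Char,
      cs.foldl (fun cur x => if PySem.Chars.isalpha x then PySem.Chars.replace cur [x] [' '] else cur) l
        = l.map (fun c => if (PySem.Chars.isalpha c = true ∧ c ∈ cs) then ' ' else c) := by
  induction cs with
  | nil => intro l; simp
  | cons x cs ih =>
    intro l
    by_cases hx : PySem.Chars.isalpha x = true
    · simp only [List.foldl_cons, hx, if_true]
      rw [replace_single, ih, List.map_map]
      congr 1
      funext c
      by_cases hcx : c = x
      · subst hcx
        have hsp : PySem.Chars.isalpha ' ' = false := by decide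
        simp [Function.comp, hx, hsp]
      · simp [Function.comp, hcx]
    · simp only [List.foldl_cons, hx, Bool.false_eq_true, if_false]
      rw [ih]
      congr 1
      funext c
      by_cases hcx : c = x
      · subst hcx
        simp [hx]
      · simp [hcx]

theorem fold_replace_self (s : List Char) :
    s.foldl (fun cur x => if PySem.Chars.isalpha x then PySem.Chars.replace cur [x] [' '] else cur) s
      = s.map (fun c => if PySem.Chars.isalpha c = true then ' ' else c) := by
  rw [fold_replace]
  apply List.map_congr_left
  intro c hc
  by_cases ha : PySem.Chars.isalpha c = true
  · simp [ha, hc]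
  · simp [ha]

-- parsing a nonempty all-digit token
theorem pvGo_digits : ∀ (ds : List Char) (acc : Nat), (∀ c ∈ ds, PySem.Chars.isdigit c = true) →
    pvGo ds true acc = some (ds.foldl (fun a c => a * 10 + (c.toNat - '0'.toNat)) acc) := by
  intro ds
  induction ds with
  | nil => intro acc _; simp [pvGo]
  | cons d t ih =>
    intro acc h
    have hd : d.isDigit = true := digit_isDigit d (h d (by simp))
    simp only [pvGo, hd, if_true, List.foldl_cons]
    exact ih _ (fun c hc => h c (by simp [hc]))

theorem natVal_cast : ∀ (ds : List Char) (acc : Nat), (∀ c ∈ ds, PySem.Chars.isdigit c = true) →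
    ((ds.foldl (fun a c => a * 10 + (c.toNat - '0'.toNat)) acc : Nat) : Int)
      = ds.foldl (fun a c => a * 10 + ((c.toNat : Int) - 48)) (acc : Int) := by
  intro ds
  induction ds with
  | nil => intro acc _; simp
  | cons c t ih =>
    intro acc h
    have hb := digit_bounds c (h c (by simp))
    have h48 : '0'.toNat = 48 := rfl
    simp only [List.foldl_cons]
    rw [ih _ (fun c' hc' => h c' (by simp [hc']))]
    congr 1
    omega

theorem dropWhile_intspace (l : List Char) (h : ∀ c ∈ l, PySem.Chars.isdigit c = true) :
    List.dropWhile PySem.Int.isIntSpace l = l := by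
  cases l with
  | nil => rfl
  | cons c t =>
    have hc := digit_not_intspace c (h c (by simp))
    simp [List.dropWhile, hc]

theorem parseD_digits (ds : List Char) (hne : ds ≠ []) (h : ∀ c ∈ ds, PySem.Chars.isdigit c = true) :
    parseD ds = vInt ds := by
  unfold parseD
  obtain ⟨d, t, rfl⟩ : ∃ d t, ds = d :: t := by
    cases ds with
    | nil => exact absurd rfl hne
    | cons d t => exact ⟨d, t, rfl⟩
  have hd : PySem.Chars.isdigit d = true := h d (by simp)
  have hb := digit_bounds d hd
  have hd1 : d ≠ '-' := by rintro rfl; exact absurd hb (by decide)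
  have hd2 : d ≠ '+' := by rintro rfl; exact absurd hb (by decide)
  have hdw1 : List.dropWhile PySem.Int.isIntSpace (d :: t) = d :: t := dropWhile_intspace _ h
  have hdw2 : List.dropWhile PySem.Int.isIntSpace (d :: t).reverse = (d :: t).reverse :=
    dropWhile_intspace _ (fun c hc => h c (List.mem_reverse.mp hc))
  simp only [pvIntOfChars?, hdw1, hdw2, List.reverse_reverse]
  split
  · next heq =>
    exfalso
    simp only [List.cons.injEq] at heq
    exact hd1 heq.1
  · next heq =>
    exfalso
    simp only [List.cons.injEq] at heq
    exact hd2 heq.1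
  · have hw : pvDigitsVal? (d :: t) = pvGo (d :: t) false 0 := rfl
    rw [hw]
    have hgo : pvGo (d :: t) false 0 = pvGo t true (0 * 10 + (d.toNat - '0'.toNat)) := by
      simp [pvGo, digit_isDigit d hd]
    rw [hgo, pvGo_digits t _ (fun c hc => h c (by simp [hc]))]
    have hred : ∀ (N : Nat),
        (Option.map (fun n : Int => n) (do let a ← some N; pure ((a : Nat) : Int))).getD 0
          = ((N : Nat) : Int) := fun _ => rfl
    rw [hred]
    rw [natVal_cast t _ (fun c hc => h c (by simp [hc]))]
    unfold vInt
    simp only [List.foldl_cons]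
    congr 1
    have h48 : '0'.toNat = 48 := rfl
    omega

-- the first accumulator of B's loop is additive
theorem bshift : ∀ (l : List Char) (a v : Int),
    l.foldl bstep (a, v) = (a + (l.foldl bstep (0, v)).1, (l.foldl bstep (0, v)).2) := by
  intro l
  induction l with
  | nil => intro a v; simp
  | cons c t ih =>
    intro a v
    simp only [List.foldl_cons]
    by_cases hc : PySem.Chars.isdigit c = true
    · have h1 : bstep (a, v) c = (a, v * 10 + ((c.toNat : Int) - 48)) := by simp [bstep, hc]
      have h2 : bstep (0, v) c = (0, v * 10 + ((c.toNat : Int) - 48)) := by simp [bstep, hc]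
      rw [h1, h2]
      exact ih a _
    · have hcf : PySem.Chars.isdigit c = false := by simpa using hc
      have h1 : bstep (a, v) c = (a + v, 0) := by simp [bstep, hcf]
      have h2 : bstep (0, v) c = (0 + v, 0) := by simp [bstep, hcf]
      rw [h1, h2, ih (a + v) 0, zero_add, ih v 0]
      simp only [Prod.mk.injEq]
      exact ⟨by ring, by trivial⟩

-- main invariant: token-wise sum over split₀.go equals B's run-accumulating pass
theorem split_sum : ∀ (l : List Char), (∀ c ∈ l, PySem.Chars.isdigit c = true ∨ PySem.Chars.isspace c = true) →
    ∀ (cur : List Char) (acc : List (List Char)), (∀ c ∈ cur, PySem.Chars.isdigit c = true) →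
      ((PySem.Chars.split₀.go l cur acc).map parseD).sum
        = (acc.map parseD).sum + (l.foldl bstep (0, vInt cur.reverse)).1
            + (l.foldl bstep (0, vInt cur.reverse)).2 := by
  intro l
  induction l with
  | nil =>
    intro _ cur acc hcur
    by_cases hc : cur = []
    · subst hc
      simp [PySem.Chars.split₀.go, vInt, List.map_reverse, List.sum_reverse]
    · have hce : cur.isEmpty = false := by simpa [List.isEmpty_iff] using hc
      simp only [PySem.Chars.split₀.go, hce, Bool.false_eq_true, if_false, List.foldl_nil]
      rw [List.map_reverse, List.sum_reverse]
      simp only [List.map_cons, List.sum_cons]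
      rw [parseD_digits cur.reverse (by simpa using hc) (fun c hcm => hcur c (List.mem_reverse.mp hcm))]
      ring
  | cons c rest ih =>
    intro hl cur acc hcur
    have hcc := hl c (by simp)
    by_cases hs : PySem.Chars.isspace c = true
    · have hd : PySem.Chars.isdigit c = false := by
        cases hd' : PySem.Chars.isdigit c with
        | false => rfl
        | true => exact absurd (digit_not_space c hd') (by simp [hs])
      by_cases hcur0 : cur = []
      · subst hcur0
        have hce : List.isEmpty ([] : List Char) = true := rfl
        simp only [PySem.Chars.split₀.go, hs, if_true, hce]
        rw [ih (fun c' hc' => hl c' (by simp [hc'])) [] acc (by simp)]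
        simp [bstep, hd, vInt]
      · have hce : cur.isEmpty = false := by simpa [List.isEmpty_iff] using hcur0
        simp only [PySem.Chars.split₀.go, hs, if_true, hce, Bool.false_eq_true, if_false]
        rw [ih (fun c' hc' => hl c' (by simp [hc'])) [] (cur.reverse :: acc) (by simp)]
        simp only [List.map_cons, List.sum_cons, List.foldl_cons]
        have hstep : bstep (0, vInt cur.reverse) c = (vInt cur.reverse, 0) := by
          simp [bstep, hd]
        rw [hstep, bshift rest (vInt cur.reverse) 0]
        rw [parseD_digits cur.reverse (by simpa using hcur0)
          (fun c' hcm => hcur c' (List.mem_reverse.mp hcm))]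
        have hv0 : vInt (([] : List Char).reverse) = 0 := rfl
        rw [hv0]
        ring
    · have hd : PySem.Chars.isdigit c = true := by
        rcases hcc with h' | h'
        · exact h'
        · exact absurd h' (by simp [hs])
      simp only [PySem.Chars.split₀.go, hs, Bool.false_eq_true, if_false]
      rw [ih (fun c' hc' => hl c' (by simp [hc'])) (c :: cur) acc
        (by intro c' hc'; rcases List.mem_cons.mp hc' with rfl | hm; exact hd; exact hcur c' hm)]
      have hv : vInt ((c :: cur).reverse) = vInt cur.reverse * 10 + ((c.toNat : Int) - 48) := by
        simp [vInt, List.foldl_append]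
      rw [hv]
      simp only [List.foldl_cons]
      have hstep : bstep (0, vInt cur.reverse) c
          = (0, vInt cur.reverse * 10 + ((c.toNat : Int) - 48)) := by
        simp [bstep, hd]
      rw [hstep]

-- ===== VERDICT (by name: the statement is the Claim_ definition above) =====
theorem solution_spec : Claim_equal_solution := by
  unfold Claim_equal_solution
  intro s _ hpre
  have hpre' : ∀ c ∈ s.toList,
      (PySem.Chars.isalpha c || PySem.Chars.isdigit c || PySem.Chars.isspace c) = true := by
    intro c hc
    exact List.all_eq_true.mp hpre c hc
  show (PySem.Chars.split₀ (s.toList.foldl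
        (fun cur x => if PySem.Chars.isalpha x then PySem.Chars.replace cur [x] [' '] else cur)
        s.toList)).foldl (fun answer i => answer + (pvIntOfChars? i).getD 0) 0
      = (s.toList.foldl (fun (st : Int × Int) ch =>
          if PySem.Chars.isdigit ch then (st.1, st.2 * 10 + ((ch.toNat : Int) - 48))
          else (st.1 + st.2, 0)) (0, 0)).1
        + (s.toList.foldl (fun (st : Int × Int) ch =>
          if PySem.Chars.isdigit ch then (st.1, st.2 * 10 + ((ch.toNat : Int) - 48))
          else (st.1 + st.2, 0)) (0, 0)).2
  rw [fold_replace_self]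
  rw [PySem.List.foldl_add]
  have hparse : (fun i => (pvIntOfChars? i).getD 0) = parseD := rfl
  rw [hparse]
  have hsplit : PySem.Chars.split₀
      (s.toList.map (fun c => if PySem.Chars.isalpha c = true then ' ' else c))
      = PySem.Chars.split₀.go
        (s.toList.map (fun c => if PySem.Chars.isalpha c = true then ' ' else c)) [] [] := rfl
  rw [hsplit]
  rw [split_sum _ (by
      intro c' hc'
      rcases List.mem_map.mp hc' with ⟨c, hcm, rfl⟩
      by_cases ha : PySem.Chars.isalpha c = true
      · simp only [ha, if_true]
        right; decide
      · simp only [ha]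
        have hor := hpre' c hcm
        simp only [Bool.or_eq_true] at hor
        rcases hor with (h' | h') | h'
        · exact absurd h' ha
        · exact Or.inl h'
        · exact Or.inr h') [] [] (by simp)]
  rw [List.foldl_map]
  rw [PySem.List.foldl_congr_mem _ _ bstep _ (by
      intro acc c hcm
      by_cases ha : PySem.Chars.isalpha c = true
      · have hd : PySem.Chars.isdigit c = false := alpha_not_digit c ha
        have hsd : PySem.Chars.isdigit ' ' = false := by decide
        simp [bstep, ha, hd, hsd]
      · simp [ha])]
  have hb : (fun (st : Int × Int) ch =>
      if PySem.Chars.isdigit ch then (st.1, st.2 * 10 + ((ch.toNat : Int) - 48))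
      else (st.1 + st.2, 0)) = bstep := rfl
  rw [hb]
  have hv0 : vInt (([] : List Char).reverse) = 0 := rfl
  rw [hv0]
  simp
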